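-- pv_equiv track=rewrite | github.com/The-Resonance-Institute/verus-public | packages/ingestion/normalizers/xlsx.py | _sample_rows
-- ===== SOURCE A (Python) =====
-- from typing import Any, Optional
--
-- _SAMPLE_ROWS                  = 50    # Rows per sample window (first / mid / last)
--
-- def _sample_rows(rows: list[list[Any]]) -> list[list[Any]]:
--     """
--     Sample a large row list into first N, middle N, and last N rows.
--     The three windows may overlap for very long sheets — deduplication
--     is applied so each row appears at most once.
--     """
--     n = len(rows)
--     s = _SAMPLE_ROWS
--
--     first_end  = min(s, n)
--     last_start = max(0, n - s)
--     mid_start  = max(first_end, (n // 2) - (s // 2))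
--     mid_end    = min(last_start, mid_start + s)
--
--     # Collect indices, preserving order, deduplicating
--     seen: set[int] = set()
--     indices: list[int] = []
--     for i in (
--         list(range(0, first_end)) +
--         list(range(mid_start, mid_end)) +
--         list(range(last_start, n))
--     ):
--         if i not in seen:
--             seen.add(i)
--             indices.append(i)
--
--     return [rows[i] for i in sorted(indices)]
-- ===== SOURCE B (Python) =====
-- _SAMPLE_ROWS = 50    # Rows per sample window (first / mid / last)
--
--
-- def _sample_rows(rows):
--     """
--     Sample first/mid/last window of rows.  Instead of collecting indices in a
--     seen-set and sorting, merge the three (already start-ordered) index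
--     intervals and concatenate the corresponding slices.
--     """
--     n = len(rows)
--     s = _SAMPLE_ROWS
--
--     first_end  = min(s, n)
--     last_start = max(0, n - s)
--     mid_start  = max(first_end, (n // 2) - (s // 2))
--     mid_end    = min(last_start, mid_start + s)
--
--     merged = []
--     for a, b in ((0, first_end), (mid_start, mid_end), (last_start, n)):
--         if a < b:
--             if merged and a <= merged[-1][1]:
--                 merged[-1] = (merged[-1][0], max(merged[-1][1], b))
--             else:
--                 merged.append((a, b))
--
--     out = []
--     for a, b in merged:
--         out.extend(rows[a:b])
--     return out
-- ===== Notes on version B (the rewrite author's own statement) =====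
-- stated objective: alternative
-- what changed: Replaces the seen-set index collection with a final sort by merging the three start-ordered index intervals and concatenating the corresponding slices.
import Mathlib
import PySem

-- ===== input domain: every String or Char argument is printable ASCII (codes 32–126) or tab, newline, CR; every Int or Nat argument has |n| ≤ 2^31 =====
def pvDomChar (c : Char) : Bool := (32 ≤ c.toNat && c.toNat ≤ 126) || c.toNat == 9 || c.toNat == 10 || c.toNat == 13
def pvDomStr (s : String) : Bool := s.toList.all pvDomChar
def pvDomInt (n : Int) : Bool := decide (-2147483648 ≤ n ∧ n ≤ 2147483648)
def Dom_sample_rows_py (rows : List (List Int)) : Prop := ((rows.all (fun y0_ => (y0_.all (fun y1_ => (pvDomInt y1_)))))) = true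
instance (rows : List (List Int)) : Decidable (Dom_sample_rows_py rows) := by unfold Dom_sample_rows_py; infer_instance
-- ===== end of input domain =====

-- B merges the three start-ordered sample windows into disjoint intervals and concatenates
-- slices, instead of A's seen-set of indices followed by a sort (objective: alternative).

-- ===== PORT A =====
-- port of A's `[rows[i] for i in sorted(indices)]`: every collected index lies in
-- [0, len(rows)), so the total pyGetD with default [] is exact (rows[i] never raises)
def sample_rows_py (rows : List (List Int)) : List (List Int) :=
  let n : Int := PySem.List.len rows
  let s : Int := 50
  let first_end := min s n
  let last_start := max 0 (n - s)
  let mid_start := max first_end (PySem.Int.floordiv n 2 - PySem.Int.floordiv s 2)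
  let mid_end := min last_start (mid_start + s)
  let st :=
    (PySem.List.pyRange 0 first_end 1 ++ PySem.List.pyRange mid_start mid_end 1 ++
        PySem.List.pyRange last_start n 1).foldl
      (fun (st : PySem.Set Int × List Int) i =>
        if ¬ PySem.Set.contains st.1 i then (PySem.Set.add st.1 i, st.2 ++ [i]) else st)
      (PySem.Set.empty, [])
  (PySem.List.sorted st.2 (fun x => x) false).map (fun i => PySem.List.pyGetD rows i [])

-- ===== PORT B =====
-- one merge step of B's loop body (skip an empty interval; extend the last merged
-- interval when the new one overlaps or touches it, else append it)
def pvMergeStep (merged : List (Int × Int)) (iv : Int × Int) : List (Int × Int) :=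
  if iv.1 < iv.2 then
    match merged.getLast? with
    | some last =>
        if iv.1 ≤ last.2 then merged.dropLast ++ [(last.1, max last.2 iv.2)]
        else merged ++ [iv]
    | none => [iv]
  else merged

def sample_rows_py_alt (rows : List (List Int)) : List (List Int) :=
  let n : Int := PySem.List.len rows
  let s : Int := 50
  let first_end := min s n
  let last_start := max 0 (n - s)
  let mid_start := max first_end (PySem.Int.floordiv n 2 - PySem.Int.floordiv s 2)
  let mid_end := min last_start (mid_start + s)
  let merged := [((0 : Int), first_end), (mid_start, mid_end), (last_start, n)].foldl pvMergeStep []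
  merged.foldl (fun out iv => out ++ PySem.List.slice rows (some iv.1) (some iv.2)) []

-- ===== PRECONDITION & SPEC =====
def Spec_sample_rows_py (rows : List (List Int)) (out : List (List Int)) : Prop := out = sample_rows_py_alt rows
instance (rows : List (List Int)) (out : List (List Int)) : Decidable (Spec_sample_rows_py rows out) := by unfold Spec_sample_rows_py; infer_instance

-- ===== CLAIM (what is proved, stated in full; the proofs are below) =====
def Claim_equal_sample_rows_py : Prop := ∀ (rows : List (List Int)), Dom_sample_rows_py rows → Spec_sample_rows_py rows (sample_rows_py rows)

-- ===== LEMMAS AND PROOFS =====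

-- fold with (seen,set) pair = Set.ofList
lemma pv_fold_pair (xs : List Int) (s : List Int) :
    (xs.foldl (fun (st : PySem.Set Int × List Int) i =>
        if ¬ PySem.Set.contains st.1 i then (PySem.Set.add st.1 i, st.2 ++ [i]) else st)
      (s, s)).2 = xs.foldl PySem.Set.add s := by
  induction xs generalizing s with
  | nil => rfl
  | cons x xs ih =>
      simp only [List.foldl]
      by_cases h : x ∈ s
      · have hc : PySem.Set.contains s x = true := (PySem.Set.contains_iff s x).2 h
        simp only [hc, not_true]
        rw [PySem.Set.add_of_mem h]
        simpa using ih s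
      · have hc : ¬ (PySem.Set.contains s x = true) := fun hh => h ((PySem.Set.contains_iff s x).1 hh)
        simp only [hc]
        rw [show PySem.Set.add s x = s ++ [x] from PySem.Set.add_of_not_mem h] at *
        simpa [PySem.Set.add_of_not_mem h] using ih (s ++ [x])

lemma pv_update_of_subset (s xs : List Int) (h : ∀ x ∈ xs, x ∈ s) :
    PySem.Set.update s xs = s := by
  induction xs generalizing s with
  | nil => simp [PySem.Set.update_nil]
  | cons x xs ih =>
      rw [PySem.Set.update_cons, PySem.Set.add_of_mem (h x (by simp))]
      exact ih s (fun y hy => h y (by simp [hy]))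

lemma pv_update_of_disjoint (s xs : List Int) (hnd : xs.Nodup) (h : ∀ x ∈ xs, x ∉ s) :
    PySem.Set.update s xs = s ++ xs := by
  induction xs generalizing s with
  | nil => simp [PySem.Set.update_nil]
  | cons x xs ih =>
      rw [PySem.Set.update_cons, PySem.Set.add_of_not_mem (h x (by simp))]
      rw [ih (s ++ [x]) hnd.of_cons]
      · simp
      · intro y hy
        simp only [List.mem_append, List.mem_singleton]
        rintro (hs | rfl)
        · exact h y (by simp [hy]) hs
        · exact (List.nodup_cons.1 hnd).1 hy

lemma pv_dedup_ranges (fe ms me ls n : Int)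
    (_h1 : 0 ≤ fe) (h2 : fe ≤ n) (h3 : fe ≤ ms) (h4 : 0 ≤ ls) (h5 : ls ≤ n) (h6 : me ≤ ls) :
    PySem.Set.ofList (PySem.List.pyRange 0 fe 1 ++ PySem.List.pyRange ms me 1 ++
        PySem.List.pyRange ls n 1) =
      PySem.List.pyRange 0 fe 1 ++ PySem.List.pyRange ms me 1 ++
        PySem.List.pyRange (max fe ls) n 1 := by
  rw [PySem.Set.ofList_append, PySem.Set.ofList_append]
  rw [PySem.Set.ofList_eq_self_of_nodup _ (PySem.List.nodup_pyRange_one 0 fe)]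
  rw [pv_update_of_disjoint (PySem.List.pyRange 0 fe) (PySem.List.pyRange ms me) (PySem.List.nodup_pyRange_one ms me)
    (by
      intro x hx hx'
      rw [PySem.List.mem_pyRange_one] at hx hx'
      omega)]
  rw [PySem.List.pyRange_one_append ls (max fe ls) n (le_max_right _ _) (max_le h2 h5)]
  rw [PySem.Set.update_append]
  rw [pv_update_of_subset (PySem.List.pyRange 0 fe ++ PySem.List.pyRange ms me) (PySem.List.pyRange ls (max fe ls))
    (by
      intro x hx
      rw [PySem.List.mem_pyRange_one] at hx
      rw [List.mem_append, PySem.List.mem_pyRange_one]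
      left
      omega)]
  rw [pv_update_of_disjoint (PySem.List.pyRange 0 fe ++ PySem.List.pyRange ms me) (PySem.List.pyRange (max fe ls) n) (PySem.List.nodup_pyRange_one _ n)
    (by
      intro x hx hx'
      rw [PySem.List.mem_pyRange_one] at hx
      rw [List.mem_append, PySem.List.mem_pyRange_one, PySem.List.mem_pyRange_one] at hx'
      omega)]

lemma pv_pairwise_ranges (fe ms me ls n : Int) (h3 : fe ≤ ms) (h6 : me ≤ ls) :
    (PySem.List.pyRange 0 fe 1 ++ PySem.List.pyRange ms me 1 ++
        PySem.List.pyRange (max fe ls) n 1).Pairwise (fun a b => a ≤ b) := by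
  rw [List.pairwise_append, List.pairwise_append]
  refine ⟨⟨(PySem.List.pairwise_lt_pyRange_one 0 fe).imp (fun h => le_of_lt h),
    (PySem.List.pairwise_lt_pyRange_one ms me).imp (fun h => le_of_lt h), ?_⟩,
    (PySem.List.pairwise_lt_pyRange_one _ n).imp (fun h => le_of_lt h), ?_⟩
  · intro a ha b hb
    rw [PySem.List.mem_pyRange_one] at ha hb
    omega
  · intro a ha b hb
    rw [List.mem_append, PySem.List.mem_pyRange_one, PySem.List.mem_pyRange_one] at ha
    rw [PySem.List.mem_pyRange_one] at hb
    omega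

lemma pv_map_pyGetD_eq_sliceN (xs : List (List Int)) (a b : Nat) (hb : b ≤ xs.length) :
    (PySem.List.pyRange (a : Int) (b : Int) 1).map (fun i => PySem.List.pyGetD xs i []) =
      PySem.List.slice xs (some (a : Int)) (some (b : Int)) := by
  rw [PySem.List.pyRange_one, PySem.List.slice_natCast]
  have h1 : (((b : Int) - (a : Int)).toNat) = b - a := by omega
  rw [h1, List.map_map]
  apply List.ext_getElem
  · simp
    omega
  · intro i h2 h3
    have hia : a + i < xs.length := by simp at h2; omega
    simp only [List.getElem_map, List.getElem_range, Function.comp_apply,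
      List.getElem_take, List.getElem_drop]
    have : ((a : Int) + (i : Int)) = ((a + i : Nat) : Int) := by push_cast; ring
    rw [this, PySem.List.pyGetD_natCast]
    exact List.getD_eq_getElem xs [] hia

lemma pv_map_pyGetD_eq_slice (xs : List (List Int)) (a b : Int) (h0 : 0 ≤ a) (h0b : 0 ≤ b)
    (hb : b ≤ (xs.length : Int)) :
    (PySem.List.pyRange a b 1).map (fun i => PySem.List.pyGetD xs i []) =
      PySem.List.slice xs (some a) (some b) := by
  by_cases hab : a ≤ b
  · lift a to ℕ using h0
    lift b to ℕ using h0b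
    exact pv_map_pyGetD_eq_sliceN xs a b (by exact_mod_cast hb)
  · rw [PySem.List.pyRange_one_eq_nil (by omega : b ≤ a), PySem.List.slice_toNat xs h0 (by omega)]
    have : b.toNat - a.toNat = 0 := by omega
    simp [this]

lemma pv_slice_split (xs : List (List Int)) (a m b : Int) (h0 : 0 ≤ a) (h1 : a ≤ m)
    (h2 : m ≤ b) :
    PySem.List.slice xs (some a) (some b) =
      PySem.List.slice xs (some a) (some m) ++ PySem.List.slice xs (some m) (some b) := by
  rw [PySem.List.slice_toNat xs h0 (by omega), PySem.List.slice_toNat xs h0 (by omega),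
    PySem.List.slice_toNat xs (by omega) (by omega)]
  have h3 : b.toNat - a.toNat = (m.toNat - a.toNat) + (b.toNat - m.toNat) := by omega
  rw [h3, List.take_add, List.drop_drop]
  have h4 : a.toNat + (m.toNat - a.toNat) = m.toNat := by omega
  rw [h4]

lemma pv_slice_nil (xs : List (List Int)) (a b : Int) (h0 : 0 ≤ b) (h : b ≤ a) :
    PySem.List.slice xs (some a) (some b) = [] := by
  rw [PySem.List.slice_toNat xs (by omega) h0]
  have : b.toNat - a.toNat = 0 := by omega
  simp [this]

lemma pv_main (rows : List (List Int)) : sample_rows_py rows = sample_rows_py_alt rows := by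
  by_cases hrows : rows = []
  · subst hrows; decide
  simp only [sample_rows_py, sample_rows_py_alt, PySem.List.len_eq,
    PySem.Int.floordiv_eq_ediv_of_pos (show (0:Int) < 2 by norm_num), PySem.Set.empty]
  rw [show (50:Int)/2 = 25 from by norm_num]
  set nI : Int := (rows.length : Int) with hnI
  set fe : Int := min 50 nI with hfe
  set ls : Int := max 0 (nI - 50) with hls
  set ms : Int := max fe (nI/2 - 25) with hms
  set me : Int := min ls (ms + 50) with hme
  have hpos : 0 < nI := by
    have : rows.length ≠ 0 := fun h => hrows (List.length_eq_zero_iff.1 h)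
    omega
  have hfe0 : 0 < fe := by omega
  have hfen : fe ≤ nI := by omega
  have hfems : fe ≤ ms := by omega
  have hls0 : 0 ≤ ls := by omega
  have hlsn : ls < nI := by omega
  have hmels : me ≤ ls := by omega
  have hms0 : 0 ≤ ms := by omega
  have hme0 : 0 ≤ me := by omega
  rw [pv_fold_pair _ [], ← PySem.Set.ofList_eq_foldl]
  rw [pv_dedup_ranges fe ms me ls nI (by omega) hfen hfems hls0 (by omega) hmels]
  rw [PySem.List.sorted_eq_self_of_pairwise _ _ (pv_pairwise_ranges fe ms me ls nI hfems hmels)]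
  rw [List.map_append, List.map_append]
  rw [pv_map_pyGetD_eq_slice rows 0 fe le_rfl (by omega) (by omega),
      pv_map_pyGetD_eq_slice rows ms me hms0 hme0 (by omega),
      pv_map_pyGetD_eq_slice rows (max fe ls) nI (by omega) (by omega) (by omega)]
  simp only [List.foldl]
  rw [show pvMergeStep [] (0, fe) = [(0, fe)] from by
    simp [pvMergeStep, show (0:Int) < fe from hfe0]]
  by_cases hmid : ms < me
  · have hfels : fe ≤ ls := by omega
    have hgl : max fe ls = ls := by omega
    by_cases hm2 : ms ≤ fe
    · have hmsfe : ms = fe := le_antisymm hm2 hfems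
      rw [show pvMergeStep [(0, fe)] (ms, me) = [(0, me)] from by
        simp [pvMergeStep, hmid, hm2, show max fe me = me from by omega]]
      by_cases hm3 : ls ≤ me
      · have hmels' : me = ls := le_antisymm hmels hm3
        rw [show pvMergeStep [(0, me)] (ls, nI) = [(0, nI)] from by
          simp [pvMergeStep, hlsn, hm3, show max me nI = nI from by omega]]
        simp only [List.foldl, List.nil_append]
        rw [hgl, hmsfe, hmels']
        rw [← pv_slice_split rows 0 fe ls le_rfl (by omega) (by omega)]
        rw [← pv_slice_split rows 0 ls nI le_rfl hls0 (by omega)]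
      · rw [show pvMergeStep [(0, me)] (ls, nI) = [(0, me), (ls, nI)] from by
          simp [pvMergeStep, hlsn, hm3]]
        simp only [List.foldl, List.nil_append]
        rw [hgl, hmsfe]
        rw [← pv_slice_split rows 0 fe me le_rfl (by omega) (by omega)]
    · rw [show pvMergeStep [(0, fe)] (ms, me) = [(0, fe), (ms, me)] from by
        simp [pvMergeStep, hmid, hm2]]
      by_cases hm3 : ls ≤ me
      · have hmels' : me = ls := le_antisymm hmels hm3
        rw [show pvMergeStep [(0, fe), (ms, me)] (ls, nI) = [(0, fe), (ms, nI)] from by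
          simp [pvMergeStep, hlsn, hm3, show max me nI = nI from by omega]]
        simp only [List.foldl, List.nil_append]
        rw [hgl, hmels']
        rw [List.append_assoc, ← pv_slice_split rows ms ls nI hms0 (by omega) (by omega)]
      · rw [show pvMergeStep [(0, fe), (ms, me)] (ls, nI) = [(0, fe), (ms, me), (ls, nI)] from by
          simp [pvMergeStep, hlsn, hm3]]
        simp only [List.foldl, List.nil_append]
        rw [hgl, List.append_assoc]
  · rw [show pvMergeStep [(0, fe)] (ms, me) = [(0, fe)] from by
      simp [pvMergeStep, hmid]]
    rw [pv_slice_nil rows ms me hme0 (by omega)]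
    by_cases hm3 : ls ≤ fe
    · have hgf : max fe ls = fe := by omega
      rw [show pvMergeStep [(0, fe)] (ls, nI) = [(0, nI)] from by
        simp [pvMergeStep, hlsn, hm3, show max fe nI = nI from by omega]]
      simp only [List.foldl, List.nil_append, List.append_nil]
      rw [hgf, ← pv_slice_split rows 0 fe nI le_rfl (by omega) (by omega)]
    · have hgl : max fe ls = ls := by omega
      rw [show pvMergeStep [(0, fe)] (ls, nI) = [(0, fe), (ls, nI)] from by
        simp [pvMergeStep, hlsn, hm3]]
      simp only [List.foldl, List.nil_append, List.append_nil]
      rw [hgl]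

-- ===== VERDICT (by name: the statement is the Claim_ definition above) =====
theorem sample_rows_py_spec : Claim_equal_sample_rows_py := by
  intro rows _
  exact pv_main rows
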